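-- pv_equiv track=rewrite | github.com/NanZhangpikequ/spartahack | aimode/ai_select_wordlist.py | _is_weird_token
-- ===== SOURCE A (Python) =====
-- def _is_weird_token(tok: str) -> bool:
--     """
--     判断是不是“很奇怪、不像正常英文单词”的 token：
--     - 含数字
--     - 含非 ASCII 字符
--     - 连字符/单引号太多（音译/特殊记号）
--     - 又有连字符又有引号
--     - 太长且几乎没有元音
--     这类我们要么直接丢掉，要么排到最后。
--     """
--     if not tok:
--         return True
--
--     # 有数字
--     if any(ch.isdigit() for ch in tok):
--         return True
--
--     # 非 ASCII 字符
--     try: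
--         tok.encode("ascii")
--     except UnicodeEncodeError:
--         return True
--
--     # 连字符/引号过多
--     hy = tok.count("-")
--     ap = tok.count("'")
--     if hy > 1 or ap > 1:
--         return True
--     if hy >= 1 and ap >= 1:
--         return True
--
--     # 特别长又几乎没元音（大概率是缩写/音译）
--     if len(tok) > 15 and not any(v in tok for v in "aeiou"):
--         return True
--
--     return False
-- ===== SOURCE B (Python) =====
-- def _is_weird_token(tok: str) -> bool:
--     # Single pass over the characters maintaining flags and counters,
--     # then one combined decision (instead of five separate scans).
--     if not tok:
--         return True
--     has_digit = False
--     non_ascii = False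
--     has_vowel = False
--     hy = 0
--     ap = 0
--     for ch in tok:
--         if ch.isdigit():
--             has_digit = True
--         if ord(ch) > 127:
--             non_ascii = True
--         if ch == '-':
--             hy += 1
--         if ch == "'":
--             ap += 1
--         if ch in "aeiou":
--             has_vowel = True
--     return (has_digit or non_ascii or hy > 1 or ap > 1
--             or (hy >= 1 and ap >= 1)
--             or (len(tok) > 15 and not has_vowel))
-- ===== Notes on version B (the rewrite author's own statement) =====
-- stated objective: alternative
-- what changed: Replaces A's five separate scans of the token (any-digit generator, ascii encode, two str.count calls, five substring searches for vowels) with one loop over the characters maintaining flags and two counters, combined in a single final boolean.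
import Mathlib
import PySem

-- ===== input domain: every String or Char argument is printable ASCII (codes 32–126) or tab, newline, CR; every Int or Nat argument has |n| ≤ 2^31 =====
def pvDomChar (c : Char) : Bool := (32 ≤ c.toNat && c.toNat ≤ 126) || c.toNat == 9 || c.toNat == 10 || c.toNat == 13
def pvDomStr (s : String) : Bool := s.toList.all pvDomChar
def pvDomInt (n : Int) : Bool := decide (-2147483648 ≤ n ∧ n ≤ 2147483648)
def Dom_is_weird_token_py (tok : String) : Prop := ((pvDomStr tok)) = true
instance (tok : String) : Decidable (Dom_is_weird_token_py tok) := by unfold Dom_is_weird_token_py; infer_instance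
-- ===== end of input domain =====

-- B replaces A's five separate scans of the token with one character loop
-- maintaining flags and counters, combined in a single final boolean (alternative decomposition).


-- ===== PORT A =====
-- literal transliteration: empty guard, any-digit scan, ascii scan (encode raises iff some
-- code point > 127), two str.count calls, then the hyphen/apostrophe and long-no-vowel tests
def is_weird_token_py (tok : String) : Bool :=
  let l := tok.toList
  if l.isEmpty then true
  else if l.any PySem.Chars.isdigit then true
  else if l.any (fun ch => decide (ch.toNat > 127)) then true
  else
    let hy := PySem.Chars.count l ['-']
    let ap := PySem.Chars.count l ['\'']
    if hy > 1 || ap > 1 then true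
    else if hy ≥ 1 && ap ≥ 1 then true
    else if decide (PySem.Chars.len l > 15) &&
            !(['a','e','i','o','u'].any (fun v => PySem.Chars.isIn [v] l)) then true
    else false

-- ===== PORT B =====
-- single fold over the characters: (has_digit, non_ascii, hy, ap, has_vowel)
def is_weird_token_py_alt (tok : String) : Bool :=
  let l := tok.toList
  if l.isEmpty then true
  else
    let st := l.foldl
      (fun (s : Bool × Bool × Int × Int × Bool) ch =>
        ( s.1 || PySem.Chars.isdigit ch,
          s.2.1 || decide (ch.toNat > 127),
          s.2.2.1 + (if ch = '-' then 1 else 0),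
          s.2.2.2.1 + (if ch = '\'' then 1 else 0),
          s.2.2.2.2 || decide (ch ∈ ['a','e','i','o','u']) ))
      (false, false, 0, 0, false)
    st.1 || st.2.1 || decide (st.2.2.1 > 1) || decide (st.2.2.2.1 > 1) ||
      (decide (st.2.2.1 ≥ 1) && decide (st.2.2.2.1 ≥ 1)) ||
      (decide ((l.length : Int) > 15) && !st.2.2.2.2)

-- ===== PRECONDITION & SPEC =====
def Spec_is_weird_token_py (tok : String) (out : Bool) : Prop := out = is_weird_token_py_alt tok
instance (tok : String) (out : Bool) : Decidable (Spec_is_weird_token_py tok out) := by unfold Spec_is_weird_token_py; infer_instance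

-- ===== CLAIM (what is proved, stated in full; the proofs are below) =====
def Claim_equal_is_weird_token_py : Prop := ∀ (tok : String), Dom_is_weird_token_py tok → Spec_is_weird_token_py tok (is_weird_token_py tok)

-- ===== LEMMAS AND PROOFS =====

theorem pv_go_singleton (c : Char) : ∀ (l : List Char) (acc : ℕ),
    PySem.Chars.count.go [c] l.length l acc = acc + l.count c := by
  intro l
  induction l with
  | nil => intro acc; simp [PySem.Chars.count.go]
  | cons h t ih =>
    intro acc
    rw [List.length_cons, PySem.Chars.count.go]
    by_cases hc : h = c
    · simp [hc, List.isPrefixOf, ih]; omega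
    · simp [List.isPrefixOf, hc, Ne.symm hc, ih]

theorem pv_count_singleton (s : List Char) (c : Char) :
    PySem.Chars.count s [c] = s.count c := by
  simp [PySem.Chars.count, pv_go_singleton]

theorem pv_isIn_singleton (v : Char) (l : List Char) :
    PySem.Chars.isIn [v] l = l.contains v := by
  rw [Bool.eq_iff_iff, PySem.Chars.isIn_iff_infix]
  constructor
  · rintro ⟨s, t, rfl⟩
    simp
  · intro h
    simp at h
    obtain ⟨s, t, rfl⟩ := List.append_of_mem h
    exact ⟨s, t, by simp⟩

theorem pv_vowel_scan (l : List Char) :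
    (['a','e','i','o','u'].any (fun v => PySem.Chars.isIn [v] l))
      = l.any (fun ch => decide (ch ∈ (['a','e','i','o','u'] : List Char))) := by
  simp only [pv_isIn_singleton]
  rw [Bool.eq_iff_iff]
  simp only [List.any_eq_true, List.contains_iff_mem, decide_eq_true_eq]
  constructor
  · rintro ⟨v, hv, hl⟩; exact ⟨v, hl, hv⟩
  · rintro ⟨v, hl, hv⟩; exact ⟨v, hv, hl⟩

theorem pv_fold_spec (l : List Char) : ∀ (hd na hv : Bool) (hy ap : Int),
    l.foldl
      (fun (s : Bool × Bool × Int × Int × Bool) ch =>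
        ( s.1 || PySem.Chars.isdigit ch,
          s.2.1 || decide (ch.toNat > 127),
          s.2.2.1 + (if ch = '-' then 1 else 0),
          s.2.2.2.1 + (if ch = '\'' then 1 else 0),
          s.2.2.2.2 || decide (ch ∈ ['a','e','i','o','u']) ))
      (hd, na, hy, ap, hv)
    = ( hd || l.any PySem.Chars.isdigit,
        na || l.any (fun ch => decide (ch.toNat > 127)),
        hy + l.count '-',
        ap + l.count '\'',
        hv || l.any (fun ch => decide (ch ∈ ['a','e','i','o','u'])) ) := by
  induction l with
  | nil => intro hd na hv hy ap; simp
  | cons h t ih =>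
    intro hd na hv hy ap
    simp only [List.foldl_cons, ih, List.any_cons, List.count_cons]
    refine congrArg₂ _ (by rw [Bool.or_assoc]) (congrArg₂ _ (by rw [Bool.or_assoc]) ?_)
    refine congrArg₂ _ ?_ (congrArg₂ _ ?_ (by rw [Bool.or_assoc]))
    · by_cases hc : h = '-' <;> simp [hc, beq_iff_eq] <;> omega
    · by_cases hc : h = '\'' <;> simp [hc, beq_iff_eq] <;> omega

-- ===== VERDICT (by name: the statement is the Claim_ definition above) =====
theorem is_weird_token_py_spec : Claim_equal_is_weird_token_py := by
  intro tok _
  unfold Spec_is_weird_token_py is_weird_token_py is_weird_token_py_alt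
  set l := tok.toList with hl
  by_cases he : l.isEmpty
  · simp [he]
  · simp only [he, if_false, pv_fold_spec, pv_count_singleton, pv_vowel_scan,
      PySem.Chars.len_eq, Bool.false_or, Int.zero_add]
    cases hd : l.any PySem.Chars.isdigit <;>
    cases hna : l.any (fun ch => decide (ch.toNat > 127)) <;>
    cases hv : l.any (fun ch => decide (ch ∈ (['a','e','i','o','u'] : List Char))) <;>
      simp <;>
      by_cases h1 : l.count '-' > 1 <;>
      by_cases h2 : l.count '\'' > 1 <;>
      by_cases h3 : l.count '-' ≥ 1 <;>
      by_cases h4 : l.count '\'' ≥ 1 <;>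
      by_cases h5 : l.length > 15 <;>
      simp [h1, h2, h3, h4, h5] <;> omega
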